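-- pv_equiv track=rewrite | github.com/zzarbttoo/TMT | YJ/20200626_1_5.py | dfs
-- ===== SOURCE A (Python) =====
-- def dfs(root, visited, computers):
--
--     stack = []
--     stack.append(root)
--     visited[root] = True
--
--     for i,j in enumerate (computers[stack.pop()]):
--         if visited[i] == False and j == 1:
--             visited[i] = True
--             stack.append(i)
--
--     while stack:
--         visited=dfs(stack.pop(), visited, computers)
--
--     return visited
-- ===== SOURCE B (Python) =====
-- def dfs(root, visited, computers):
--     visited[root] = True
--     stack = [root]
--     while stack:
--         row = computers[stack.pop()]
--         i = 0
--         while i < len(row):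
--             if row[i] == 1 and not visited[i]:
--                 visited[i] = True
--                 stack.append(i)
--             i += 1
--     return visited
-- ===== Notes on version B (the rewrite author's own statement) =====
-- stated objective: simpler
-- what changed: A's recursive DFS (a fresh stack per call, one recursive dfs call per stacked node, enumerate over the neighbour row) is replaced by a single non-recursive explicit-stack loop whose inner scan is a plain index-counter while-loop over the popped row.
-- outside the precondition, e.g. on dfs(0, [False], [[1], [1, 1]]): A returns [True], B returns [True]
import Mathlib
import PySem

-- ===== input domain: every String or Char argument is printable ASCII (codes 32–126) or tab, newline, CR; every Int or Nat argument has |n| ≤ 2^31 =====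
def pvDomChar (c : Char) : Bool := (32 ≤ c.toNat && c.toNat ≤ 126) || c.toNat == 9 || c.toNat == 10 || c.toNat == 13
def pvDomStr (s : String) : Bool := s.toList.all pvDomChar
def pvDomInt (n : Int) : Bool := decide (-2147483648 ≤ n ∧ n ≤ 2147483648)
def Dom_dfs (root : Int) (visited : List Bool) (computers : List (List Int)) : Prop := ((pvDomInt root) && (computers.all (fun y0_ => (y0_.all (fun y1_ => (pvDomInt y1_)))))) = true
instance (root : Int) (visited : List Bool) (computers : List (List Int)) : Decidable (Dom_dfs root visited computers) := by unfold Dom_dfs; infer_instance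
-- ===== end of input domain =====

-- B replaces A's recursion (a fresh stack and one recursive dfs call per stacked node,
-- enumerate over the neighbour row) by a single non-recursive explicit-stack loop whose
-- inner scan is a plain index-counter while-loop: simpler, no recursion. Both Pythons
-- mutate `visited` in place to the same final content; the claim proved here is about
-- the returned list.

-- ===== PORT A =====
-- A's inner `for i, j in enumerate(computers[stack.pop()]): if visited[i] == False and j == 1: ...`
-- as a fold step over the enumerated row; the state is (visited, stack).
-- `visited[i]` is read with pyGet? (none where Python raises IndexError — outside Pre_).
def dfsStepA (s : List Bool × List Int) (p : Int × Int) : List Bool × List Int :=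
  if (PySem.List.pyGet? s.1 p.1 == some false) && (p.2 == 1) then
    (PySem.List.pySetD s.1 p.1 true, s.2 ++ [p.1])
  else s

-- A is recursive; every recursive call is on a node freshly marked True, so the recursion
-- depth is at most (count of False entries) + 1 ≤ visited.length + 1: `dfs` runs the literal
-- body with that fuel, and the proofs below show the fuel-exhausted branch is never reached
-- (a totality guard, not a change of algorithm).
-- `while stack: visited = dfs(stack.pop(), ...)` pops from the end: foldl over stack.reverse.
def dfsGo : Nat → Int → List Bool → List (List Int) → List Bool
  | 0, _, visited, _ => visited
  | f + 1, root, visited, computers =>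
    let visited1 := PySem.List.pySetD visited root true
    let s := (PySem.List.enumerate (PySem.List.pyGetD computers root []) 0).foldl dfsStepA
      (visited1, ([] : List Int))
    s.2.reverse.foldl (fun w m => dfsGo f m w computers) s.1

def dfs (root : Int) (visited : List Bool) (computers : List (List Int)) : List Bool :=
  dfsGo (visited.length + 1) root visited computers

-- ===== PORT B =====
-- B's inner `i = 0; while i < len(row): if row[i] == 1 and not visited[i]: ...; i += 1`
-- as structural recursion on the index counter i (decreasing row.length - i).
-- `visited[i]` is read with pyGet?; where Python would raise (outside Pre_) the port
-- treats the read as True, i.e. does not push.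
def dfsScan (row : List Int) (i : Nat) (v : List Bool) (st : List Int) : List Bool × List Int :=
  if h : i < row.length then
    if (row[i] == 1) && !((PySem.List.pyGet? v (i : Int)).getD true) then
      dfsScan row (i + 1) (PySem.List.pySetD v (i : Int) true) (st ++ [(i : Int)])
    else
      dfsScan row (i + 1) v st
  else (v, st)
termination_by row.length - i

-- B's outer `while stack:`; `stack.pop()` = last element (getLast?/dropLast); each
-- iteration pops one node and pushes only freshly marked indices, so the number of
-- iterations is at most 1 + (count of False entries) ≤ visited.length + 1 = the fuel
-- (a totality guard proved sufficient below).
def dfsLoop : Nat → List Bool → List Int → List (List Int) → List Bool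
  | 0, v, _, _ => v
  | f + 1, v, stack, computers =>
    match stack.getLast? with
    | none => v
    | some node =>
      let s := dfsScan (PySem.List.pyGetD computers node []) 0 v stack.dropLast
      dfsLoop f s.1 s.2 computers

def dfs_alt (root : Int) (visited : List Bool) (computers : List (List Int)) : List Bool :=
  dfsLoop (visited.length + 1) (PySem.List.pySetD visited root true) [root] computers

-- ===== PRECONDITION & SPEC =====
-- Pre_ restricts to the task's natural adjacency-matrix shape: root indexes both visited
-- and computers, and every row's width is at most |visited| and at most |computers|.
-- On ragged matrices A raises IndexError whenever its traversal touches an oversized row;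
-- whether it does depends on reachability, not on any closed-form shape, so this shape
-- condition (the domain the function is written for) also excludes some ragged inputs on
-- which A happens to return because the oversized row is unreachable.
def Pre_dfs (root : Int) (visited : List Bool) (computers : List (List Int)) : Prop :=
  PySem.Raise.InRange visited.length root ∧
  PySem.Raise.InRange computers.length root ∧
  (∀ row ∈ computers, row.length ≤ visited.length ∧ row.length ≤ computers.length)

instance (root : Int) (visited : List Bool) (computers : List (List Int)) : Decidable (Pre_dfs root visited computers) := by
  unfold Pre_dfs; unfold PySem.Raise.InRange; infer_instance

def pvWitness_dfs : Int × List Bool × List (List Int) := (0, [false, false], [[0, 1], [1, 0]])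

def Spec_dfs (root : Int) (visited : List Bool) (computers : List (List Int)) (out : List Bool) : Prop := out = dfs_alt root visited computers
instance (root : Int) (visited : List Bool) (computers : List (List Int)) (out : List Bool) : Decidable (Spec_dfs root visited computers out) := by unfold Spec_dfs; infer_instance

-- ===== CLAIM (what is proved, stated in full; the proofs are below) =====
def Claim_equal_dfs : Prop := ∀ (root : Int) (visited : List Bool) (computers : List (List Int)), Dom_dfs root visited computers → Pre_dfs root visited computers → Spec_dfs root visited computers (dfs root visited computers)

-- ===== LEMMAS AND PROOFS =====

-- count of unvisited entries: the termination measure of the whole development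
def fcount (v : List Bool) : Nat := List.count false v

-- `p` is a non-negative, valid, already-True index of `w`
def pvMarked (w : List Bool) (p : Int) : Prop := ∃ k : Nat, p = (k : Int) ∧ w[k]? = some true

-- proof-only abstraction of one expansion step, shared shape for both ports' inner loops
def dfsStepB (s : List Bool × List Int) (p : Int × Int) : List Bool × List Int :=
  if (!((PySem.List.pyGet? s.1 p.1).getD true)) && (p.2 == 1) then
    (PySem.List.pySetD s.1 p.1 true, s.2 ++ [p.1])
  else s

theorem stepA_eq_stepB : dfsStepA = dfsStepB := by
  funext s p
  unfold dfsStepA dfsStepB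
  rcases h : PySem.List.pyGet? s.1 p.1 with _ | b
  · simp
  · cases b <;> simp_all

-- B's index-counter scan computes the fold of dfsStepB over the enumerated row suffix
theorem dfsScan_eq_fold (row : List Int) : ∀ (i : Nat) (v : List Bool) (st : List Int),
    dfsScan row i v st =
      (PySem.List.enumerate (row.drop i) (i : Int)).foldl dfsStepB (v, st) := by
  intro i
  induction hn : row.length - i using Nat.strong_induction_on generalizing i with
  | _ n ih =>
    intro v st
    rw [dfsScan]
    by_cases h : i < row.length
    · rw [dif_pos h]
      have hdrop : row.drop i = row[i] :: row.drop (i + 1) :=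
        List.drop_eq_getElem_cons h
      rw [hdrop, PySem.List.enumerate_cons]
      have hrec : ∀ v' st', dfsScan row (i + 1) v' st' =
          (PySem.List.enumerate (row.drop (i + 1)) ((i : Int) + 1)).foldl dfsStepB (v', st') := by
        intro v' st'
        have := ih (row.length - (i + 1)) (by omega) (i + 1) rfl v' st'
        rwa [show ((i + 1 : Nat) : Int) = (i : Int) + 1 by push_cast; ring] at this
      simp only [List.foldl_cons]
      by_cases hg : ((row[i] == 1) && !((PySem.List.pyGet? v (i : Int)).getD true)) = true
      · rw [if_pos hg]
        have hstep : dfsStepB (v, st) ((i : Int), row[i])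
            = (PySem.List.pySetD v (i : Int) true, st ++ [(i : Int)]) := by
          unfold dfsStepB
          rw [if_pos]
          rw [Bool.and_comm] at hg
          simpa using hg
        rw [hstep, hrec]
      · rw [if_neg hg]
        have hstep : dfsStepB (v, st) ((i : Int), row[i]) = (v, st) := by
          unfold dfsStepB
          rw [if_neg]
          rw [Bool.and_comm] at hg
          simpa using hg
        rw [hstep, hrec]
    · rw [dif_neg h]
      rw [List.drop_eq_nil_of_le (by omega)]
      simp [PySem.List.enumerate]

theorem fcount_le_length (v : List Bool) : fcount v ≤ v.length :=
  List.count_le_length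

theorem enumerate_fst_nonneg {α : Type} (xs : List α) (p : Int × α)
    (hp : p ∈ PySem.List.enumerate xs 0) : 0 ≤ p.1 := by
  obtain ⟨k, hk, rfl⟩ := (PySem.List.mem_enumerate_iff xs 0 p).mp hp
  simp

theorem set_true_eq_self {v : List Bool} {k : Nat} (h : v[k]? = some true) :
    v.set k true = v := by
  apply List.ext_getElem?
  intro j
  rcases eq_or_ne k j with rfl | hne
  · rw [List.getElem?_set_self (List.getElem?_eq_some_iff.mp h).1, h]
  · exact List.getElem?_set_ne hne

theorem pvMarked_pySetD_eq {w : List Bool} {p : Int} (h : pvMarked w p) :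
    PySem.List.pySetD w p true = w := by
  obtain ⟨k, rfl, hk⟩ := h
  rw [PySem.List.pySetD_natCast, set_true_eq_self hk]

theorem fcount_set_true_le (v : List Bool) : ∀ (k : Nat),
    fcount (v.set k true) ≤ fcount v := by
  induction v with
  | nil => intro k; simp [fcount]
  | cons x t ih =>
    intro k
    cases k with
    | zero => cases x <;> simp [fcount]
    | succ k =>
      simp only [List.set_cons_succ, fcount, List.count_cons]
      have := ih k
      unfold fcount at this
      omega

theorem fcount_set_true_of_false {v : List Bool} : ∀ {k : Nat}, v[k]? = some false →
    fcount (v.set k true) + 1 = fcount v := by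
  induction v with
  | nil => intro k h; simp at h
  | cons x t ih =>
    intro k h
    cases k with
    | zero =>
      simp only [List.getElem?_cons_zero, Option.some_inj] at h
      subst h
      simp [fcount]
    | succ k =>
      simp only [List.getElem?_cons_succ] at h
      simp only [List.set_cons_succ, fcount, List.count_cons]
      have := ih h
      unfold fcount at this
      omega

theorem pySetD_cases (v : List Bool) (i : Int) :
    PySem.List.pySetD v i true = v ∨
    ∃ k : Nat, k < v.length ∧ PySem.List.pySetD v i true = v.set k true := by
  unfold PySem.List.pySetD PySem.List.pySet? PySem.List.pyIdx?
  split_ifs with h1 h2 h3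
  · exact Or.inr ⟨i.toNat, by omega, rfl⟩
  · exact Or.inl rfl
  · exact Or.inr ⟨v.length - (-i).toNat, by omega, rfl⟩
  · exact Or.inl rfl

theorem pySetD_monotone (v : List Bool) (i : Int) :
    (PySem.List.pySetD v i true).length = v.length ∧
    fcount (PySem.List.pySetD v i true) ≤ fcount v ∧
    (∀ k : Nat, v[k]? = some true → (PySem.List.pySetD v i true)[k]? = some true) := by
  rcases pySetD_cases v i with h | ⟨k, hk, h⟩ <;> rw [h]
  · exact ⟨rfl, le_rfl, fun _ h => h⟩
  · refine ⟨by simp, fcount_set_true_le v k, fun j hj => ?_⟩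
    rcases eq_or_ne k j with rfl | hne
    · rw [List.getElem?_set_self hk]
    · rw [List.getElem?_set_ne hne]; exact hj

-- a fold of dfsStepB only appends to the stack component; pull the initial stack out
theorem foldB_init (ps : List (Int × Int)) : ∀ (v : List Bool) (st : List Int),
    ps.foldl dfsStepB (v, st) =
      ((ps.foldl dfsStepB (v, ([] : List Int))).1,
        st ++ (ps.foldl dfsStepB (v, ([] : List Int))).2) := by
  induction ps with
  | nil => intro v st; simp
  | cons p ps ih =>
    intro v st
    simp only [List.foldl_cons]
    by_cases h : ((!((PySem.List.pyGet? v p.1).getD true)) && (p.2 == 1)) = true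
    · have h1 : dfsStepB (v, st) p = (PySem.List.pySetD v p.1 true, st ++ [p.1]) := by
        simp [dfsStepB, h]
      have h2 : dfsStepB (v, ([] : List Int)) p
          = (PySem.List.pySetD v p.1 true, [] ++ [p.1]) := by
        simp [dfsStepB, h]
      rw [h1, h2, ih, ih (PySem.List.pySetD v p.1 true) ([] ++ [p.1])]
      simp
    · have h1 : dfsStepB (v, st) p = (v, st) := by simp [dfsStepB, h]
      have h2 : dfsStepB (v, ([] : List Int)) p = (v, ([] : List Int)) := by
        simp [dfsStepB, h]
      rw [h1, h2, ih]

-- the expansion fold over an enumerated row (all indices non-negative): length preserved,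
-- each push pairs with a fresh mark, marks are monotone, every pushed index is pvMarked
theorem foldB_spec (ps : List (Int × Int)) : ∀ (v : List Bool),
    (∀ p ∈ ps, 0 ≤ p.1) →
    ((ps.foldl dfsStepB (v, ([] : List Int))).1.length = v.length) ∧
    (fcount (ps.foldl dfsStepB (v, ([] : List Int))).1
        + (ps.foldl dfsStepB (v, ([] : List Int))).2.length = fcount v) ∧
    (∀ k : Nat, v[k]? = some true → (ps.foldl dfsStepB (v, ([] : List Int))).1[k]? = some true) ∧
    (∀ p ∈ (ps.foldl dfsStepB (v, ([] : List Int))).2,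
        pvMarked (ps.foldl dfsStepB (v, ([] : List Int))).1 p) := by
  induction ps with
  | nil => intro v _; exact ⟨rfl, rfl, fun _ h => h, by simp⟩
  | cons p ps ih =>
    intro v hps
    have hp1 : 0 ≤ p.1 := hps p (List.mem_cons_self)
    have hps' : ∀ q ∈ ps, 0 ≤ q.1 := fun q hq => hps q (List.mem_cons_of_mem _ hq)
    simp only [List.foldl_cons]
    by_cases h : ((!((PySem.List.pyGet? v p.1).getD true)) && (p.2 == 1)) = true
    · -- a push: p.1 is a fresh False index, now set True
      have hstep : dfsStepB (v, ([] : List Int)) p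
          = (v.set p.1.toNat true, [p.1]) := by
        simp [dfsStepB, h, PySem.List.pySetD_of_nonneg v true hp1]
      have hget : v[p.1.toNat]? = some false := by
        obtain ⟨hfalse, -⟩ := Bool.and_eq_true_iff.mp h
        rw [PySem.List.pyGet?_of_nonneg v hp1] at hfalse
        rcases hg : v[p.1.toNat]? with _ | b
        · rw [hg] at hfalse; simp at hfalse
        · rw [hg] at hfalse; cases b <;> simp_all
      rw [hstep, foldB_init ps (v.set p.1.toNat true) [p.1]]
      obtain ⟨ih1, ih2, ih3, ih4⟩ := ih (v.set p.1.toNat true) hps'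
      have hlt : p.1.toNat < v.length := (List.getElem?_eq_some_iff.mp hget).1
      refine ⟨by simpa using ih1, ?_, ?_, ?_⟩
      · simp only [List.length_append, List.length_cons, List.length_nil]
        have := fcount_set_true_of_false hget
        omega
      · intro k hk
        apply ih3
        rcases eq_or_ne p.1.toNat k with rfl | hne
        · rw [List.getElem?_set_self hlt]
        · rw [List.getElem?_set_ne hne]; exact hk
      · intro q hq
        rcases List.mem_append.mp hq with hq | hq
        · simp only [List.mem_singleton] at hq
          subst hq
          exact ⟨p.1.toNat, (Int.toNat_of_nonneg hp1).symm,
            ih3 p.1.toNat (List.getElem?_set_self hlt)⟩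
        · exact ih4 q hq
    · have hstep : dfsStepB (v, ([] : List Int)) p = (v, []) := by
        unfold dfsStepB; rw [if_neg h]
      rw [hstep]
      exact ih v hps'

-- expansion of one node, starting from an arbitrary stack `st`: the combined shape fact
theorem expand_spec (c : List (List Int)) (node : Int) (v : List Bool) (st : List Int) :
    ((PySem.List.enumerate (PySem.List.pyGetD c node []) 0).foldl dfsStepB (v, st)).1
      = ((PySem.List.enumerate (PySem.List.pyGetD c node []) 0).foldl dfsStepB (v, ([] : List Int))).1 ∧
    ((PySem.List.enumerate (PySem.List.pyGetD c node []) 0).foldl dfsStepB (v, st)).2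
      = st ++ ((PySem.List.enumerate (PySem.List.pyGetD c node []) 0).foldl dfsStepB (v, ([] : List Int))).2 := by
  rw [foldB_init]
  exact ⟨rfl, rfl⟩

-- fuel-free version of B's loop, for the proofs only (well-founded on fcount + stack length)
def loopW (v : List Bool) (stack : List Int) (c : List (List Int)) : List Bool :=
  if hst : stack = [] then v
  else
    let node := stack.getLast hst
    let s := (PySem.List.enumerate (PySem.List.pyGetD c node []) 0).foldl dfsStepB
      (v, stack.dropLast)
    loopW s.1 s.2 c
termination_by fcount v + stack.length
decreasing_by
  obtain ⟨h1, h2⟩ := expand_spec c (stack.getLast hst) v stack.dropLast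
  obtain ⟨-, hc, -, -⟩ := foldB_spec
    (PySem.List.enumerate (PySem.List.pyGetD c (stack.getLast hst) []) 0) v
    (enumerate_fst_nonneg _)
  have hpos : 0 < stack.length := List.length_pos_iff.mpr hst
  have hd : stack.dropLast.length = stack.length - 1 := List.length_dropLast
  simp only [h1, h2, List.length_append]
  omega

theorem loopW_nil (v : List Bool) (c : List (List Int)) : loopW v [] c = v := by
  rw [loopW]
  simp

theorem loopW_concat (v : List Bool) (T : List Int) (m : Int) (c : List (List Int)) :
    loopW v (T ++ [m]) c =
      loopW ((PySem.List.enumerate (PySem.List.pyGetD c m []) 0).foldl dfsStepB (v, T)).1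
            ((PySem.List.enumerate (PySem.List.pyGetD c m []) 0).foldl dfsStepB (v, T)).2 c := by
  rw [loopW]
  have hne : T ++ [m] ≠ [] := by simp
  rw [dif_neg hne]
  simp only [List.getLast_concat, List.dropLast_concat]

-- B's fueled loop computes loopW whenever the fuel exceeds the measure
theorem dfsLoop_eq_loopW : ∀ (f : Nat) (v : List Bool) (stack : List Int) (c : List (List Int)),
    fcount v + stack.length < f → dfsLoop f v stack c = loopW v stack c := by
  intro f
  induction f with
  | zero => intro v stack c h; omega
  | succ f ih =>
    intro v stack c h
    rcases List.eq_nil_or_concat stack with rfl | ⟨T, node, rfl⟩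
    · rw [loopW_nil]
      simp [dfsLoop]
    · rw [List.concat_eq_append] at h ⊢
      simp only [dfsLoop, List.getLast?_concat, List.dropLast_concat]
      rw [dfsScan_eq_fold, List.drop_zero, Int.natCast_zero, loopW_concat]
      obtain ⟨h1, h2⟩ := expand_spec c node v T
      obtain ⟨-, hc, -, -⟩ := foldB_spec (PySem.List.enumerate (PySem.List.pyGetD c node []) 0) v
        (enumerate_fst_nonneg _)
      apply ih
      rw [h1, h2]
      simp only [List.length_append, List.length_cons, List.length_nil] at h ⊢
      omega

-- A's recursion never unmarks, never lengthens, never decreases the measure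
theorem dfsGo_monotone : ∀ (f : Nat) (m : Int) (v : List Bool) (c : List (List Int)),
    (dfsGo f m v c).length = v.length ∧
    fcount (dfsGo f m v c) ≤ fcount v ∧
    (∀ k : Nat, v[k]? = some true → (dfsGo f m v c)[k]? = some true) := by
  intro f
  induction f with
  | zero => intro m v c; exact ⟨rfl, le_rfl, fun _ h => h⟩
  | succ f ih =>
    intro m v c
    simp only [dfsGo, stepA_eq_stepB]
    obtain ⟨hs1, hs2, hs3⟩ := pySetD_monotone v m
    obtain ⟨he1, he2, he3, -⟩ := foldB_spec
      (PySem.List.enumerate (PySem.List.pyGetD c m []) 0) (PySem.List.pySetD v m true)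
      (enumerate_fst_nonneg _)
    set v2 := ((PySem.List.enumerate (PySem.List.pyGetD c m []) 0).foldl dfsStepB
      (PySem.List.pySetD v m true, ([] : List Int))).1 with hv2
    set P := ((PySem.List.enumerate (PySem.List.pyGetD c m []) 0).foldl dfsStepB
      (PySem.List.pySetD v m true, ([] : List Int))).2 with hP
    -- fold the recursive calls over the reversed push list
    have main : ∀ (L : List Int) (w : List Bool),
        (L.foldl (fun w m => dfsGo f m w c) w).length = w.length ∧
        fcount (L.foldl (fun w m => dfsGo f m w c) w) ≤ fcount w ∧
        (∀ k : Nat, w[k]? = some true → (L.foldl (fun w m => dfsGo f m w c) w)[k]? = some true) := by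
      intro L
      induction L with
      | nil => intro w; exact ⟨rfl, le_rfl, fun _ h => h⟩
      | cons x L ihL =>
        intro w
        simp only [List.foldl_cons]
        obtain ⟨g1, g2, g3⟩ := ih x w c
        obtain ⟨l1, l2, l3⟩ := ihL (dfsGo f x w c)
        exact ⟨l1.trans g1, l2.trans g2, fun k hk => l3 k (g3 k hk)⟩
    obtain ⟨m1, m2, m3⟩ := main P.reverse v2
    refine ⟨?_, ?_, ?_⟩
    · rw [m1, he1, hs1]
    · calc fcount (P.reverse.foldl (fun w m => dfsGo f m w c) v2) ≤ fcount v2 := m2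
        _ ≤ fcount (PySem.List.pySetD v m true) := by omega
        _ ≤ fcount v := hs2
    · intro k hk
      exact m3 k (he3 k (hs3 k hk))

-- THE BRIDGE: running A on node m (fuel f ≥ fcount + 1) and then B's loop on the rest of the
-- stack T equals running B's loop on T with m pushed on top.
theorem bridge : ∀ (n : Nat) (v : List Bool) (m : Int) (T : List Int) (f : Nat)
    (c : List (List Int)),
    fcount (PySem.List.pySetD v m true) ≤ n →
    fcount (PySem.List.pySetD v m true) + 1 ≤ f →
    loopW (PySem.List.pySetD v m true) (T ++ [m]) c = loopW (dfsGo f m v c) T c := by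
  intro n
  induction n with
  | zero =>
    intro v m T f c hn hf
    obtain ⟨f, rfl⟩ : ∃ f', f = f' + 1 := ⟨f - 1, by omega⟩
    set v1 := PySem.List.pySetD v m true with hv1
    obtain ⟨he1, he2, he3, he4⟩ := foldB_spec
      (PySem.List.enumerate (PySem.List.pyGetD c m []) 0) v1 (enumerate_fst_nonneg _)
    have hP : ((PySem.List.enumerate (PySem.List.pyGetD c m []) 0).foldl dfsStepB
        (v1, ([] : List Int))).2 = [] := by
      have : fcount v1 = 0 := by omega
      rw [this] at he2
      exact List.length_eq_zero_iff.mp (by omega)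
    rw [loopW_concat]
    obtain ⟨h1, h2⟩ := expand_spec c m v1 T
    rw [h1, h2, hP, List.append_nil]
    simp only [dfsGo, stepA_eq_stepB, ← hv1, hP, List.reverse_nil, List.foldl_nil]
  | succ n ihn =>
    intro v m T f c hn hf
    obtain ⟨f, rfl⟩ : ∃ f', f = f' + 1 := ⟨f - 1, by omega⟩
    set v1 := PySem.List.pySetD v m true with hv1
    obtain ⟨he1, he2, he3, he4⟩ := foldB_spec
      (PySem.List.enumerate (PySem.List.pyGetD c m []) 0) v1 (enumerate_fst_nonneg _)
    set v2 := ((PySem.List.enumerate (PySem.List.pyGetD c m []) 0).foldl dfsStepB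
      (v1, ([] : List Int))).1 with hv2
    set P := ((PySem.List.enumerate (PySem.List.pyGetD c m []) 0).foldl dfsStepB
      (v1, ([] : List Int))).2 with hP
    rw [loopW_concat]
    obtain ⟨h1, h2⟩ := expand_spec c m v1 T
    rw [h1, h2, ← hv2, ← hP]
    simp only [dfsGo, stepA_eq_stepB, ← hv1, ← hv2, ← hP]
    -- goal: loopW v2 (T ++ P) c = loopW (P.reverse.foldl (fun w x => dfsGo f x w c) v2) T c
    -- inner induction on P from the right
    have inner : ∀ (P' : List Int) (w : List Bool) (T' : List Int),
        (∀ p ∈ P', pvMarked w p) →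
        fcount w + P'.length ≤ fcount v1 →
        loopW w (T' ++ P') c = loopW (P'.reverse.foldl (fun w x => dfsGo f x w c) w) T' c := by
      intro P'
      induction P' using List.reverseRecOn with
      | nil => intro w T' _ _; simp
      | append_singleton P' x ihP =>
        intro w T' hmk hfc
        simp only [List.length_append, List.length_cons, List.length_nil] at hfc
        have hxm : pvMarked w x := hmk x (by simp)
        have hwx : PySem.List.pySetD w x true = w := pvMarked_pySetD_eq hxm
        have hwn : fcount (PySem.List.pySetD w x true) ≤ n := by rw [hwx]; omega
        have hwf : fcount (PySem.List.pySetD w x true) + 1 ≤ f := by rw [hwx]; omega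
        rw [← List.append_assoc]
        have step1 := ihn w x (T' ++ P') f c hwn hwf
        rw [hwx] at step1
        rw [step1]
        obtain ⟨g1, g2, g3⟩ := dfsGo_monotone f x w c
        have hmk' : ∀ p ∈ P', pvMarked (dfsGo f x w c) p := by
          intro p hp
          obtain ⟨k, rfl, hk⟩ := hmk p (List.mem_append_left _ hp)
          exact ⟨k, rfl, g3 k hk⟩
        have hfc' : fcount (dfsGo f x w c) + P'.length ≤ fcount v1 := by
          have := g2; omega
        rw [ihP (dfsGo f x w c) T' hmk' hfc']
        simp
    have hmkP : ∀ p ∈ P, pvMarked v2 p := he4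
    have hfcP : fcount v2 + P.length ≤ fcount v1 := by omega
    exact inner P v2 T hmkP hfcP

-- with the root in range, marking it leaves strictly fewer than `length` False entries
theorem pySetD_inRange (v : List Bool) (i : Int) (h : PySem.Raise.InRange v.length i) :
    ∃ k : Nat, k < v.length ∧ PySem.List.pySetD v i true = v.set k true := by
  obtain ⟨h1, h2⟩ := h
  unfold PySem.List.pySetD PySem.List.pySet? PySem.List.pyIdx?
  split_ifs
  all_goals try exact ⟨i.toNat, by omega, rfl⟩
  all_goals try exact ⟨v.length - (-i).toNat, by omega, rfl⟩

theorem fcount_set_true_lt {v : List Bool} {k : Nat} (hk : k < v.length) :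
    fcount (v.set k true) < v.length := by
  rcases Nat.lt_or_ge (fcount (v.set k true)) v.length with h | h
  · exact h
  · exfalso
    have hle : fcount (v.set k true) ≤ (v.set k true).length := fcount_le_length _
    rw [List.length_set] at hle
    have heq : fcount (v.set k true) = (v.set k true).length := by
      rw [List.length_set]; omega
    have hall := List.count_eq_length.mp heq
    have hmem : (v.set k true)[k] ∈ v.set k true := List.getElem_mem (by simpa using hk)
    have h2 := hall _ hmem
    rw [List.getElem_set_self (by simpa using hk)] at h2
    cases h2

theorem fcount_set_root_lt {v : List Bool} {root : Int}
    (h : PySem.Raise.InRange v.length root) :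
    fcount (PySem.List.pySetD v root true) < v.length := by
  obtain ⟨k, hk, hcase⟩ := pySetD_inRange v root h
  rw [hcase]
  exact fcount_set_true_lt hk

-- ===== VERDICT (by name: the statement is the Claim_ definition above) =====
theorem dfs_spec : Claim_equal_dfs := by
  intro root visited computers _ hpre
  obtain ⟨hr, -, -⟩ := hpre
  unfold Spec_dfs dfs dfs_alt
  have hlt : fcount (PySem.List.pySetD visited root true) < visited.length :=
    fcount_set_root_lt hr
  rw [dfsLoop_eq_loopW _ _ _ _
    (by simp only [List.length_cons, List.length_nil]; omega)]
  rw [show ([root] : List Int) = [] ++ [root] from rfl,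
    bridge (fcount (PySem.List.pySetD visited root true)) visited root []
      (visited.length + 1) computers le_rfl (by omega),
    loopW_nil]
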